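-- pv_equiv track=rewrite | github.com/Prit-Pathak/Python-DSA | CODE-AND-DEBUG/11.String_ASCII/Assignment/q6.py | caps_word
-- ===== SOURCE A (Python) =====
-- def caps_word(s: str) -> str:
--     wrd = ""
--     res = ""
--
--     for ch in s:
--         if ch == " ":
--             if wrd:
--                 res += chr(ord(wrd[0]) - 32) + wrd[1:]
--             wrd = ""
--         else:
--             wrd += ch
--     if wrd:
--         res += chr(ord(wrd[0]) - 32) + wrd[1:]
--
--     return res
-- ===== SOURCE B (Python) =====
-- def caps_word(s: str) -> str:
--     return "".join(chr(ord(w[0]) - 32) + w[1:] for w in s.split(" ") if w)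
-- ===== Notes on version B (the rewrite author's own statement) =====
-- stated objective: faster
-- what changed: B replaces A's single-pass character accumulator (growing the current word and the result by repeated string concatenation) by a two-phase tokenize-then-transform: split on a single space, transform each non-empty word, join once.
import Mathlib
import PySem

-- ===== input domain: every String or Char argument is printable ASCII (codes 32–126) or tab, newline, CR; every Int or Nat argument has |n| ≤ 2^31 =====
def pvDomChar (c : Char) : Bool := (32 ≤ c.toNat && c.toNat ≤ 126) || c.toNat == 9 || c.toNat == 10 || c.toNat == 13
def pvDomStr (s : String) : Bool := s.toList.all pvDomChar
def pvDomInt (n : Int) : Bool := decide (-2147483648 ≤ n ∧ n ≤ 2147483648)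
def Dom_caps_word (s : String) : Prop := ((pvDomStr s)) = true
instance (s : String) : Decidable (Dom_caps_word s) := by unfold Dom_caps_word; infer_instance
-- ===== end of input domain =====

-- B tokenizes with split(" ") and transforms each non-empty word, instead of A's
-- character-by-character accumulator with repeated string concatenation; measured faster; proved to return the same string on Pre_.

-- ===== PORT A =====
-- chr(ord(w[0]) - 32) + w[1:]  (Pre_ guarantees ord(w[0]) ≥ 32 at every application, so Char.ofNat is exact)
def capA (w : List Char) : List Char :=
  match w with
  | [] => []
  | c :: t => Char.ofNat (c.toNat - 32) :: t

def caps_word (s : String) : String :=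
  let p := s.toList.foldl
    (fun (p : List Char × List Char) ch =>
      if ch = ' ' then ([], if p.1 ≠ [] then p.2 ++ capA p.1 else p.2)
      else (p.1 ++ [ch], p.2))
    ([], [])
  String.mk (if p.1 ≠ [] then p.2 ++ capA p.1 else p.2)

-- ===== PORT B =====
def capB (w : List Char) : List Char :=
  match w with
  | [] => []
  | c :: t => Char.ofNat (c.toNat - 32) :: t

-- s.split(" ") ported as List.splitOn ' ' (Python-exact for a one-char separator); ''.join as PySem.Chars.join []
def caps_word_alt (s : String) : String :=
  String.mk (PySem.Chars.join []
    (((s.toList.splitOn ' ').filter (fun w => w ≠ [])).map capB))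

-- ===== PRECONDITION & SPEC =====
-- Pre_ excludes exactly the inputs where the Python raises ValueError: a word starting with a
-- character of code < 32 (tab/newline/CR) makes chr(ord(w[0]) - 32) = chr(negative) raise, in A and in B alike.
def Pre_caps_word (s : String) : Prop :=
  ∀ p ∈ List.zip (' ' :: s.toList) s.toList, p.1 = ' ' → 32 ≤ p.2.toNat
instance (s : String) : Decidable (Pre_caps_word s) := by unfold Pre_caps_word; infer_instance
def pvWitness_caps_word : String := "hello world"

def Spec_caps_word (s : String) (out : String) : Prop := out = caps_word_alt s
instance (s : String) (out : String) : Decidable (Spec_caps_word s out) := by unfold Spec_caps_word; infer_instance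

-- ===== CLAIM (what is proved, stated in full; the proofs are below) =====
def Claim_equal_caps_word : Prop := ∀ (s : String), Dom_caps_word s → Pre_caps_word s → Spec_caps_word s (caps_word s)

-- ===== LEMMAS AND PROOFS =====

-- proof-only helpers: reference function gAux processes the rest of the string given the current word w
def capIf (w : List Char) : List Char := if w ≠ [] then capA w else []

def gAux (w : List Char) : List Char → List Char
  | [] => capIf w
  | c :: t => if c = ' ' then capIf w ++ gAux [] t else gAux (w ++ [c]) t

def stepA (p : List Char × List Char) (ch : Char) : List Char × List Char :=
  if ch = ' ' then ([], if p.1 ≠ [] then p.2 ++ capA p.1 else p.2)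
  else (p.1 ++ [ch], p.2)

def finishA (p : List Char × List Char) : List Char := if p.1 ≠ [] then p.2 ++ capA p.1 else p.2

lemma capA_eq_capB : capA = capB := rfl

lemma join_nil_eq_flatten (L : List (List Char)) : PySem.Chars.join [] L = L.flatten := by
  induction L with
  | nil => rfl
  | cons x xs ih =>
    cases xs with
    | nil => simp [PySem.Chars.join, List.intercalate]
    | cons y ys =>
      rw [PySem.Chars.join_cons_cons, ih]
      simp

-- A's loop computes gAux
lemma loopA_eq (l : List Char) : ∀ (w r : List Char),
    finishA (l.foldl stepA (w, r)) = r ++ gAux w l := by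
  induction l with
  | nil =>
    intro w r
    by_cases hw : w = [] <;> simp [finishA, gAux, capIf, hw]
  | cons c t ih =>
    intro w r
    by_cases hc : c = ' '
    · subst hc
      by_cases hw : w = [] <;>
        simp [List.foldl_cons, stepA, hw, gAux, capIf, ih]
    · simp [List.foldl_cons, stepA, hc, gAux, ih]

-- B's pipeline computes gAux
lemma pipelineB_eq (l : List Char) : ∀ (w : List Char), ' ' ∉ w →
    PySem.Chars.join [] ((((w ++ l).splitOn ' ').filter (fun x => x ≠ [])).map capB)
      = gAux w l := by
  induction l with
  | nil =>
    intro w hw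
    rw [List.append_nil, List.splitOn,
      List.splitOnP_eq_single _ _ (fun x hx => by simp; rintro rfl; exact hw hx),
      join_nil_eq_flatten]
    by_cases hwe : w = [] <;> simp [gAux, capIf, hwe, ← capA_eq_capB]
  | cons c t ih =>
    intro w hw
    by_cases hc : c = ' '
    · subst hc
      rw [List.splitOn,
        List.splitOnP_first _ _ (fun x hx => by simp; rintro rfl; exact hw hx) _ (by simp)]
      have hrec := ih [] (by simp)
      simp only [List.nil_append, List.splitOn] at hrec
      by_cases hwe : w = [] <;>
        simp [gAux, capIf, hwe, join_nil_eq_flatten, ← hrec, ← capA_eq_capB]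
    · have hw' : ' ' ∉ w ++ [c] := by
        intro h
        rcases List.mem_append.1 h with h | h
        · exact hw h
        · simp at h; exact hc h.symm
      have hrec := ih (w ++ [c]) hw'
      simp only [List.append_assoc, List.singleton_append] at hrec
      simp only [gAux, if_neg hc, ← hrec]

-- ===== VERDICT (by name: the statement is the Claim_ definition above) =====
theorem caps_word_spec : Claim_equal_caps_word := by
  intro s _ _
  show caps_word s = caps_word_alt s
  have hA : caps_word s = String.mk (finishA (s.toList.foldl stepA ([], []))) := rfl
  have hB := pipelineB_eq s.toList [] (by simp)
  simp only [List.nil_append] at hB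
  rw [hA, loopA_eq, caps_word_alt, hB, List.nil_append]
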